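-- pv_equiv track=rewrite | github.com/HomelessChicken78/ITS-Esercizi | Python 1-4/Bonus_Exercises/Code_and_Dragons/chapter_03/ex_03.py | symdiff_sorted
-- ===== SOURCE A (Python) =====
-- def symdiff_sorted(a: list[int], b: list[int]) -> list[int]:
--     c: list[int] = []
--
--     for el in a:
--         if el not in b and el not in c:
--             c.append(el)
--
--     for el in b:
--         if el not in a and el not in c:
--             c.append(el)
--
--     return sorted(c)
-- ===== SOURCE B (Python) =====
-- def symdiff_sorted(a: list[int], b: list[int]) -> list[int]:
--     return sorted(set(a) ^ set(b))
-- ===== Notes on version B (the rewrite author's own statement) =====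
-- stated objective: idiomatic
-- what changed: Replaces the two explicit dedup loops with repeated linear membership scans by the standard-library set symmetric difference followed by a sort.
import Mathlib
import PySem

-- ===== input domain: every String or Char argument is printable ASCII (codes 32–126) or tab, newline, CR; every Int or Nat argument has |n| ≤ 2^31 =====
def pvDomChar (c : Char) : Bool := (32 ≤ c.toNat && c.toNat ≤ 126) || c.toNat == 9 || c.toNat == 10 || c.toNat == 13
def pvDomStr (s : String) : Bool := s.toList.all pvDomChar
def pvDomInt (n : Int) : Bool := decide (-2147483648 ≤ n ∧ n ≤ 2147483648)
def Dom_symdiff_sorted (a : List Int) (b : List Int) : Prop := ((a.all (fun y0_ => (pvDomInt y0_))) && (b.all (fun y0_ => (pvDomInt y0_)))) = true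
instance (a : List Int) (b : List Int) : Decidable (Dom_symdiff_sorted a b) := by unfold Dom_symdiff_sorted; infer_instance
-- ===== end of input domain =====

-- B replaces A's quadratic dedup-and-scan loops with set symmetric difference plus a sort (idiomatic, asymptotically faster).

-- ===== PORT A =====
def symdiff_sorted (a : List Int) (b : List Int) : List Int :=
  -- c: list[int] = []; for el in a: if el not in b and el not in c: c.append(el)
  let c : List Int := a.foldl (fun c el => if el ∉ b ∧ el ∉ c then c ++ [el] else c) []
  -- for el in b: if el not in a and el not in c: c.append(el)
  let c : List Int := b.foldl (fun c el => if el ∉ a ∧ el ∉ c then c ++ [el] else c) c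
  PySem.List.sorted c (fun x => x) false

-- ===== PORT B =====
def symdiff_sorted_alt (a : List Int) (b : List Int) : List Int :=
  PySem.List.sorted (PySem.Set.symmDiff (PySem.Set.ofList a) (PySem.Set.ofList b)) (fun x => x) false

-- ===== PRECONDITION & SPEC =====
def Spec_symdiff_sorted (a : List Int) (b : List Int) (out : List Int) : Prop := out = symdiff_sorted_alt a b
instance (a : List Int) (b : List Int) (out : List Int) : Decidable (Spec_symdiff_sorted a b out) := by unfold Spec_symdiff_sorted; infer_instance

-- ===== CLAIM (what is proved, stated in full; the proofs are below) =====
def Claim_equal_symdiff_sorted : Prop := ∀ (a : List Int) (b : List Int), Dom_symdiff_sorted a b → Spec_symdiff_sorted a b (symdiff_sorted a b)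

-- ===== LEMMAS AND PROOFS =====

/-- Membership in A's accumulation loop: an element is in the result iff it was
already in the accumulator or it occurs in `l` but not in `t`. -/
theorem mem_symdiff_loop (l t acc : List Int) (x : Int) :
    x ∈ l.foldl (fun c el => if el ∉ t ∧ el ∉ c then c ++ [el] else c) acc ↔
      x ∈ acc ∨ (x ∈ l ∧ x ∉ t) := by
  induction l generalizing acc with
  | nil => simp
  | cons el l ih =>
    simp only [List.foldl_cons, ih, List.mem_cons]
    by_cases hb : el ∈ t
    · simp only [hb]
      constructor
      · rintro (h | h)
        · simp at h; tauto
        · tauto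
      · rintro (h | ⟨(rfl | h), ht⟩)
        · left; simpa
        · exact absurd hb ht
        · tauto
    · by_cases hc : el ∈ acc
      · simp only [hc]
        constructor
        · rintro (h | h)
          · simp at h; tauto
          · tauto
        · rintro (h | ⟨(rfl | h), ht⟩)
          · left; simpa
          · left; simp [hc]
          · tauto
      · simp only [hb, hc, not_false_iff, and_self, if_true, List.mem_append,
          List.mem_singleton]
        constructor
        · rintro ((h | rfl) | h) <;> tauto
        · rintro (h | ⟨(rfl | h), ht⟩) <;> tauto

/-- A's accumulation loop preserves `Nodup`. -/
theorem nodup_symdiff_loop (l t : List Int) (acc : List Int) (h : acc.Nodup) :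
    (l.foldl (fun c el => if el ∉ t ∧ el ∉ c then c ++ [el] else c) acc).Nodup := by
  induction l generalizing acc with
  | nil => simp [h]
  | cons el l ih =>
    simp only [List.foldl_cons]
    split_ifs with hcond
    · refine ih _ ?_
      simp [List.nodup_append, h]
      exact fun x hx hxe => hcond.2 (hxe ▸ hx)
    · exact ih _ h

theorem symdiff_sorted_spec' (a b : List Int) :
    symdiff_sorted a b = symdiff_sorted_alt a b := by
  unfold symdiff_sorted symdiff_sorted_alt
  apply PySem.List.sorted_eq_sorted_of_perm _ _ _ (fun x y h => h)
  refine (List.perm_ext_iff_of_nodup ?_ ?_).mpr ?_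
  · exact nodup_symdiff_loop _ _ _ (nodup_symdiff_loop _ _ _ List.nodup_nil)
  · exact PySem.Set.nodup_symmDiff _ _ (PySem.Set.nodup_ofList _) (PySem.Set.nodup_ofList _)
  · intro x
    simp only [mem_symdiff_loop, List.not_mem_nil, false_or,
      PySem.Set.mem_symmDiff, PySem.Set.mem_ofList]
    try tauto

-- ===== VERDICT (by name: the statement is the Claim_ definition above) =====
theorem symdiff_sorted_spec : Claim_equal_symdiff_sorted := by
  intro a b _
  exact symdiff_sorted_spec' a b
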